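-- pv_equiv track=rewrite | github.com/Usha320/TZ-practice-question | pythonnnn.py | robocar
-- ===== SOURCE A (Python) =====
-- def robocar(n,arr):
--     sum=0
--     for i in range(len(arr)):
--         if i>0:
--             sum+=i
--         elif i<=0:
--             sum-+i
--     return sum
-- ===== SOURCE B (Python) =====
-- def robocar(n, arr):
--     m = len(arr)
--     return m * (m - 1) // 2
-- ===== Notes on version B (the rewrite author's own statement) =====
-- stated objective: faster
-- what changed: Replaced the O(n) index loop (whose i<=0 branch is a no-op expression) by the closed-form arithmetic-series formula m*(m-1)//2.
import Mathlib
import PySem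

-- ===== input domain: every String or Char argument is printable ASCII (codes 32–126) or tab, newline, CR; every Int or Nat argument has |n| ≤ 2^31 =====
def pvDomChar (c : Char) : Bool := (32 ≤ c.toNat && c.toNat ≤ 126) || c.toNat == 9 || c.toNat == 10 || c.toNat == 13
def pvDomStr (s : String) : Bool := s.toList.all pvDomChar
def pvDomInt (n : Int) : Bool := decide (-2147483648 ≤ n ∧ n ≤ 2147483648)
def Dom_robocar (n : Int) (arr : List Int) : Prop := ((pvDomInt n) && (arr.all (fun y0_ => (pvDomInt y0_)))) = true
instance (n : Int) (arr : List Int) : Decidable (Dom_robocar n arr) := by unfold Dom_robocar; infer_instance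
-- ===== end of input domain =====

-- B replaces A's O(n) index loop (whose i<=0 branch is a no-op) by the closed form m*(m-1)//2: faster.

-- ===== PORT A =====
def robocar (n : Int) (arr : List Int) : Int :=
  (PySem.List.pyRange 0 (arr.length : Int) 1).foldl
    (fun sum i => if i > 0 then sum + i else if i ≤ 0 then sum else sum) 0

-- ===== PORT B =====
def robocar_alt (n : Int) (arr : List Int) : Int :=
  let m : Int := (arr.length : Int)
  PySem.Int.floordiv (m * (m - 1)) 2

-- ===== PRECONDITION & SPEC =====
def Spec_robocar (n : Int) (arr : List Int) (out : Int) : Prop := out = robocar_alt n arr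
instance (n : Int) (arr : List Int) (out : Int) : Decidable (Spec_robocar n arr out) := by unfold Spec_robocar; infer_instance

-- ===== CLAIM (what is proved, stated in full; the proofs are below) =====
def Claim_equal_robocar : Prop := ∀ (n : Int) (arr : List Int), Dom_robocar n arr → Spec_robocar n arr (robocar n arr)

-- ===== LEMMAS AND PROOFS =====

-- ===== VERDICT (by name: the statement is the Claim_ definition above) =====
lemma range_sum (m : Nat) (s : Int) :
    (PySem.List.pyRange 0 (m : Int) 1).foldl
      (fun sum i => if i > 0 then sum + i else if i ≤ 0 then sum else sum) s
    = s + (m : Int) * ((m : Int) - 1) / 2 := by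
  induction m generalizing s with
  | zero => simp [PySem.List.pyRange]
  | succ k ih =>
    rw [show ((k+1 : Nat) : Int) = (k : Int) + 1 by push_cast; ring,
        PySem.List.pyRange_one_succ_right (by positivity), List.foldl_append, ih]
    simp only [List.foldl]
    have h2 : (2:Int) ∣ (k : Int) * ((k : Int) - 1) := by
      have := Int.even_mul_succ_self ((k : Int) - 1)
      simpa [mul_comm] using this.two_dvd
    have hk : ((k : Int) + 1) * ((k : Int) + 1 - 1) = (k : Int) * ((k : Int) - 1) + 2 * (k : Int) := by
      ring
    split_ifs with h h'
    · omega
    · omega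
    · omega

theorem robocar_spec : Claim_equal_robocar := by
  intro n arr _
  unfold Spec_robocar robocar robocar_alt
  rw [range_sum arr.length 0]
  have hd : (2:Int) ∣ ((arr.length : Int) * ((arr.length : Int) - 1)) := by
    simpa [mul_comm] using (Int.even_mul_succ_self ((arr.length : Int) - 1)).two_dvd
  simp only [PySem.Int.floordiv, Int.fdiv_eq_ediv_of_dvd hd, zero_add]
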